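-- pv_equiv track=rewrite | github.com/GDcraft07/python_unecon | contests/contest_4.py | number_8
-- ===== SOURCE A (Python) =====
-- def number_8(number):
--     if len(str(number)) % 2 == 0:
--         return False
--
--     number = str(number)
--     mid_el = number[len(number) // 2]
--     first_el = number[0]
--
--     for i in range(len(number)):
--         if (i != len(number) // 2):
--             if (number[i] == mid_el or number[i] != first_el):
--                 return False
--
--     return True
-- ===== SOURCE B (Python) =====
-- def number_8(number):
--     s = str(number)
--     if len(s) % 2 == 0:
--         return False
--     m = len(s) // 2
--     return len(s) == 1 or (s == s[0] * m + s[m] + s[0] * m and s[m] != s[0])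
-- ===== Notes on version B (the rewrite author's own statement) =====
-- stated objective: simpler
-- what changed: B builds the expected pattern string s[0]*m + s[m] + s[0]*m and compares it in one shot (plus a len==1 / s[m]!=s[0] check), replacing A's index loop with per-position conditionals and early returns.
import Mathlib
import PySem

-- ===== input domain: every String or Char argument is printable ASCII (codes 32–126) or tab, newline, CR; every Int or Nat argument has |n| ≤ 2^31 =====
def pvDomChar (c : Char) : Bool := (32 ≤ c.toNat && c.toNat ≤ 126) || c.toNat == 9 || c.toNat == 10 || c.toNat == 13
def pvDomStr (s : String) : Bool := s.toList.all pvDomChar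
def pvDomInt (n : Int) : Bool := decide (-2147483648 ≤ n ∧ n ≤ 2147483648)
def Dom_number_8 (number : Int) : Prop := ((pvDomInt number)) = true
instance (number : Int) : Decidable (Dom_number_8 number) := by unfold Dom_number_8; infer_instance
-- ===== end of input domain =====

-- B builds the expected pattern string s[0]*m + s[m] + s[0]*m and compares it whole,
-- instead of A's per-index validation loop (objective: simpler; same asymptotic cost).

-- ===== PORT A =====
def number_8 (number : Int) : Bool :=
  if (PySem.Int.toStr number).toList.length % 2 == 0 then false
  else
    let s := (PySem.Int.toStr number).toList
    let mid_el := s.getD (s.length / 2) ' '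
    let first_el := s.getD 0 ' '
    (List.range s.length).all fun i =>
      if i ≠ s.length / 2 then
        if s.getD i ' ' == mid_el || s.getD i ' ' != first_el then false else true
      else true

-- ===== PORT B =====
def number_8_alt (number : Int) : Bool :=
  let s := (PySem.Int.toStr number).toList
  if s.length % 2 == 0 then false
  else
    let m := s.length / 2
    (s.length == 1) ||
      ((s == List.replicate m (s.getD 0 ' ') ++ [s.getD m ' '] ++ List.replicate m (s.getD 0 ' '))
        && (s.getD m ' ' != s.getD 0 ' '))

-- ===== PRECONDITION & SPEC =====
def Spec_number_8 (number : Int) (out : Bool) : Prop := out = number_8_alt number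
instance (number : Int) (out : Bool) : Decidable (Spec_number_8 number out) := by unfold Spec_number_8; infer_instance

-- ===== CLAIM (what is proved, stated in full; the proofs are below) =====
def Claim_equal_number_8 : Prop := ∀ (number : Int), Dom_number_8 number → Spec_number_8 number (number_8 number)

-- ===== LEMMAS AND PROOFS =====

-- pointwise description of B's pattern
lemma pattern_getD (m : Nat) (c d : Char) (i : Nat) (hi : i < 2 * m + 1) :
    (List.replicate m c ++ [d] ++ List.replicate m c).getD i ' ' = if i = m then d else c := by
  rw [List.getD_eq_getElem _ _ (by simp; omega)]
  simp only [List.getElem_append, List.getElem_replicate, List.getElem_singleton,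
    List.length_append, List.length_replicate, List.length_cons, List.length_nil]
  split_ifs <;> first | rfl | omega

-- the core equivalence on the digit string
lemma key (s : List Char) (hodd : s.length % 2 = 1) :
    ((List.range s.length).all fun i =>
      if i ≠ s.length / 2 then
        if s.getD i ' ' == s.getD (s.length / 2) ' ' || s.getD i ' ' != s.getD 0 ' ' then false else true
      else true)
    =
    ((s.length == 1) ||
      ((s == List.replicate (s.length / 2) (s.getD 0 ' ') ++ [s.getD (s.length / 2) ' ']
            ++ List.replicate (s.length / 2) (s.getD 0 ' '))
        && (s.getD (s.length / 2) ' ' != s.getD 0 ' '))) := by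
  set n := s.length with hn
  set m := n / 2 with hm
  set c := s.getD 0 ' '
  set d := s.getD m ' '
  have hlen : n = 2 * m + 1 := by omega
  rw [Bool.eq_iff_iff]
  simp only [List.all_eq_true, List.mem_range, Bool.or_eq_true, Bool.and_eq_true, beq_iff_eq,
    bne_iff_ne, ne_eq]
  constructor
  · intro h
    by_cases h1 : n = 1
    · exact Or.inl h1
    · right
      have hm1 : 1 ≤ m := by omega
      have h00 := h 0 (by omega)
      rw [if_pos (show ¬(0 : Nat) = m by omega)] at h00
      have h0 : ¬ c = d := by
        intro hcd
        rw [if_pos (Or.inl hcd)] at h00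
        exact absurd h00 (by simp)
      refine ⟨?_, fun hdc => h0 hdc.symm⟩
      apply List.ext_getElem
      · simp; omega
      · intro i h1' h2'
        rw [← List.getD_eq_getElem, ← List.getD_eq_getElem,
          pattern_getD m c d i (by omega)]
        by_cases him : i = m
        · rw [if_pos him, him]
        · rw [if_neg him]
          have hi := h i (by omega)
          rw [if_pos him] at hi
          by_cases hc : s.getD i ' ' = d ∨ ¬ s.getD i ' ' = c
          · rw [if_pos hc] at hi
            exact absurd hi (by simp)
          · rcases not_or.mp hc with ⟨_, hq⟩
            exact not_not.mp hq
  · rintro (h1 | ⟨hpat, hdc⟩) i hin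
    · have him : i = m := by omega
      rw [if_neg (by simp [him])]
    · by_cases him : i = m
      · rw [if_neg (by omega)]
      · rw [if_pos him]
        have hsi : s.getD i ' ' = if i = m then d else c := by
          rw [hpat]
          exact pattern_getD m c d i (by omega)
        rw [if_neg him] at hsi
        rw [if_neg]
        rintro (ha | hb)
        · exact hdc ((hsi ▸ ha).symm)
        · exact hb hsi

-- ===== VERDICT (by name: the statement is the Claim_ definition above) =====
theorem number_8_spec : Claim_equal_number_8 := by
  intro number _
  unfold Spec_number_8 number_8 number_8_alt
  set s := (PySem.Int.toStr number).toList
  by_cases he : s.length % 2 = 0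
  · simp [he]
  · have hodd : s.length % 2 = 1 := by omega
    simp only [he, beq_iff_eq]
    exact key s hodd
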